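-- pv_equiv track=rewrite | github.com/li-xin-yi/fb-hacker-cup-2022 | qual/C2.py | solve
-- ===== SOURCE A (Python) =====
-- def solve(n, first):
--     start = '.' if first[0] == '-' else '-'
--     res = []
--     for state in range(n-1):
--         cur = [start] + [first[0]]*9
--         for i in range(9):
--             mask = 1 << i
--             if state & mask:
--                 cur[i+1] = start
--         res.append(''.join(cur))
--     return '\n'.join(res)
-- ===== SOURCE B (Python) =====
-- def solve(n, first):
--     c = first[0]
--     start = '.' if c == '-' else '-'
--     # Ripple-carry counter: the 9-char row IS the binary counter (start = set bit,
--     # c = clear bit); each line is emitted then the row is incremented in place,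
--     # so no integer bit operations are performed at all.
--     row = [c] * 9
--     out = []
--     for _ in range(n - 1):
--         out.append(start + ''.join(row))
--         i = 0
--         while i < 9 and row[i] == start:
--             row[i] = c
--             i += 1
--         if i < 9:
--             row[i] = start
--     return '\n'.join(out)
-- ===== Notes on version B (the rewrite author's own statement) =====
-- stated objective: faster
-- what changed: Replaces A's per-state bit extraction (for each state, test all nine masks state & (1<<i) and patch a fresh char list) with a ripple-carry binary counter maintained directly in the row of characters: each line is emitted and the row is then incremented in place (flip leading 'set' chars, set the next), so B performs no integer bit operations and does amortized O(1) character flips per line instead of 9 shift/and tests and a fresh 10-element list per line.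
import Mathlib
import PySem

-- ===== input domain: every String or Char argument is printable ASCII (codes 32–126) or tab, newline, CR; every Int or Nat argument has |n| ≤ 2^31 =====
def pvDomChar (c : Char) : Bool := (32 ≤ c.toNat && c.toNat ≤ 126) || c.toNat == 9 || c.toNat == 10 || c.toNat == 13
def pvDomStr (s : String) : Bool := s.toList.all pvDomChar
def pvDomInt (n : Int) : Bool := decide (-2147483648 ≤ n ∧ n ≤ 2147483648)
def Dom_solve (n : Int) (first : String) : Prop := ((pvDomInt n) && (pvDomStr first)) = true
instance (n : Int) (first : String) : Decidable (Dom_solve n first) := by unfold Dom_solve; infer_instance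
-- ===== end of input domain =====

-- B replaces A's per-state integer bit tests with a ripple-carry binary counter kept
-- directly in the row of characters, incremented in place after each emitted line.

-- ===== PORT A =====
-- one iteration of A's outer loop: cur = [start] + [first[0]]*9; for i in range(9): …; ''.join(cur)
-- (cur is a Python list of 1-char strings; it is carried as List Char, ''.join = String.mk — exact)
def solveLine (start c0 : Char) (state : Int) : String :=
  let cur : List Char := [start] ++ List.replicate 9 c0
  let cur := (PySem.List.pyRange 0 9 1).foldl (fun cur i =>
    let mask : Int := 1 <<< i.toNat
    if PySem.Int.band state mask ≠ 0 then PySem.List.pySetD cur (i + 1) start else cur) cur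
  String.mk cur

def solve (n : Int) (first : String) : String :=
  match PySem.Str.pyGet? first 0 with
  | none => ""   -- first[0] raises IndexError: excluded by Pre_solve
  | some c0 =>
    let start : Char := if c0 = '-' then '.' else '-'
    let res := (PySem.List.pyRange 0 (n - 1) 1).foldl
      (fun res state => res ++ [solveLine start c0 state]) ([] : List String)
    PySem.Str.join "\n" res

-- ===== PORT B =====
-- Source B's in-place counter increment: the while loop flips leading `start` chars back to
-- c0, then the following `if` sets the first non-`start` char to `start` (if any);
-- ported as the obvious structural recursion over the row.
def incRow (start c0 : Char) : List Char → List Char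
  | [] => []
  | ch :: rest => if ch = start then c0 :: incRow start c0 rest else start :: rest

-- Source B's `for _ in range(n-1)` loop: emit the current row as a line, then increment it.
def bLoop (start c0 : Char) : Nat → List Char → List String → List String
  | 0, _, out => out
  | k + 1, row, out =>
      bLoop start c0 k (incRow start c0 row) (out ++ [String.mk (start :: row)])

def solve_alt (n : Int) (first : String) : String :=
  match PySem.Str.pyGet? first 0 with
  | none => ""   -- first[0] raises IndexError: excluded by Pre_solve
  | some c0 =>
    let start : Char := if c0 = '-' then '.' else '-'
    PySem.Str.join "\n" (bLoop start c0 (n - 1).toNat (List.replicate 9 c0) [])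

-- ===== PRECONDITION & SPEC =====
-- A evaluates first[0], which raises IndexError on the empty string; Pre_ excludes exactly that.
def Pre_solve (n : Int) (first : String) : Prop := first ≠ ""
instance (n : Int) (first : String) : Decidable (Pre_solve n first) := by
  unfold Pre_solve; infer_instance
def pvWitness_solve : Int × String := (5, "-")

def Spec_solve (n : Int) (first : String) (out : String) : Prop := out = solve_alt n first
instance (n : Int) (first : String) (out : String) : Decidable (Spec_solve n first out) := by
  unfold Spec_solve; infer_instance

-- ===== CLAIM (what is proved, stated in full; the proofs are below) =====
def Claim_equal_solve : Prop :=
  ∀ (n : Int) (first : String), Dom_solve n first → Pre_solve n first →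
    Spec_solve n first (solve n first)

-- ===== LEMMAS AND PROOFS =====

-- the row both programs reduce to, as a recursion on the width (bit j of v ↦ start/c0)
def rowOfW (start c0 : Char) : Nat → Nat → List Char
  | 0, _ => []
  | w + 1, v => (if v % 2 = 1 then start else c0) :: rowOfW start c0 w (v / 2)

lemma rowOfW_eq_map (start c0 : Char) (w : Nat) : ∀ v : Nat,
    rowOfW start c0 w v = (List.range w).map (fun j => if v.testBit j then start else c0) := by
  induction w with
  | zero => intro v; simp [rowOfW]
  | succ w ih =>
    intro v
    rw [rowOfW, List.range_succ_eq_map]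
    simp only [List.map_cons, List.map_map, ih]
    congr 1
    · rcases Nat.mod_two_eq_zero_or_one v with h | h <;> simp [Nat.testBit_zero, h]
    · apply List.map_congr_left
      intro j _
      simp [Function.comp, Nat.testBit_add_one]

-- incrementing the character counter is incrementing the number it encodes
lemma incRow_rowOfW (start c0 : Char) (hne : c0 ≠ start) (w : Nat) : ∀ v : Nat,
    incRow start c0 (rowOfW start c0 w v) = rowOfW start c0 w (v + 1) := by
  induction w with
  | zero => intro v; simp [rowOfW, incRow]
  | succ w ih =>
    intro v
    by_cases h : v % 2 = 1
    · have h1 : (v + 1) % 2 = 0 := by omega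
      have h2 : (v + 1) / 2 = v / 2 + 1 := by omega
      calc incRow start c0 (rowOfW start c0 (w + 1) v)
          = incRow start c0 (start :: rowOfW start c0 w (v / 2)) := by
            rw [rowOfW, if_pos h]
        _ = c0 :: incRow start c0 (rowOfW start c0 w (v / 2)) := by
            simp [incRow]
        _ = c0 :: rowOfW start c0 w (v / 2 + 1) := by rw [ih]
        _ = rowOfW start c0 (w + 1) (v + 1) := by
            rw [rowOfW, if_neg (by omega), h2]
    · have h1 : (v + 1) % 2 = 1 := by omega
      have h2 : (v + 1) / 2 = v / 2 := by omega
      calc incRow start c0 (rowOfW start c0 (w + 1) v)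
          = incRow start c0 (c0 :: rowOfW start c0 w (v / 2)) := by
            rw [rowOfW, if_neg h]
        _ = start :: rowOfW start c0 w (v / 2) := by
            simp only [incRow, if_neg hne]
        _ = rowOfW start c0 (w + 1) (v + 1) := by rw [rowOfW, if_pos h1, h2]

-- B's loop unrolled: the k-th emitted line is the row encoding v + k
lemma bLoop_eq (start c0 : Char) (hne : c0 ≠ start) : ∀ (m v : Nat) (out : List String),
    bLoop start c0 m (rowOfW start c0 9 v) out
      = out ++ (List.range m).map (fun j => String.mk (start :: rowOfW start c0 9 (v + j))) := by
  intro m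
  induction m with
  | zero => intro v out; simp [bLoop]
  | succ m ih =>
    intro v out
    rw [bLoop, incRow_rowOfW start c0 hne, ih (v + 1)]
    rw [List.range_succ_eq_map]
    simp only [List.map_cons, List.map_map, List.append_assoc, List.singleton_append]
    congr 2
    apply List.map_congr_left
    intro j _
    simp only [Function.comp_apply]
    have hvj : v + 1 + j = v + (j + 1) := by omega
    rw [hvj]

-- ===== A-side characterisation =====
def lineOf (start c0 : Char) (v : Nat) : List Char :=
  start :: (List.range 9).map (fun j => if v.testBit j then start else c0)

lemma mask_cond (v i : Nat) :
    (PySem.Int.band (v : Int) (((1 <<< i : Nat) : Int)) ≠ 0) ↔ v.testBit i := by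
  rw [PySem.Int.band_natCast, Nat.shiftLeft_eq, Nat.one_mul, Nat.and_two_pow]
  rcases h : v.testBit i <;> simp

lemma foldA_inv (start c0 : Char) (v : Nat) :
    ∀ (m k : Nat), k + m = 9 →
    (PySem.List.pyRange (k : Int) 9 1).foldl (fun cur i =>
        let mask : Int := 1 <<< i.toNat
        if PySem.Int.band (v : Int) mask ≠ 0 then PySem.List.pySetD cur (i + 1) start else cur)
      (start :: (List.range 9).map (fun j => if j < k ∧ v.testBit j then start else c0))
    = lineOf start c0 v := by
  intro m
  induction m with
  | zero =>
    intro k hk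
    have hk9 : k = 9 := by omega
    subst hk9
    rw [PySem.List.pyRange_one_eq_nil (by norm_num)]
    simp only [List.foldl_nil, lineOf]
    congr 1
    apply List.map_congr_left
    intro j hj
    simp only [List.mem_range] at hj
    simp [hj]
  | succ m ih =>
    intro k hk
    have hk9 : k < 9 := by omega
    rw [PySem.List.pyRange_one_cons (by exact_mod_cast hk9)]
    rw [List.foldl_cons]
    have hstep : (let mask : Int := 1 <<< (k : Int).toNat;
        if PySem.Int.band (v : Int) mask ≠ 0 then
          PySem.List.pySetD (start :: (List.range 9).map (fun j => if j < k ∧ v.testBit j then start else c0)) ((k : Int) + 1) start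
        else (start :: (List.range 9).map (fun j => if j < k ∧ v.testBit j then start else c0)))
        = (start :: (List.range 9).map (fun j => if j < k + 1 ∧ v.testBit j then start else c0)) := by
      simp only [Int.toNat_natCast]
      by_cases hb : v.testBit k
      · rw [if_pos ((mask_cond v k).mpr hb)]
        have : ((k : Int) + 1) = ((k + 1 : Nat) : Int) := by push_cast; ring
        rw [this, PySem.List.pySetD_natCast]
        show (start :: _).set (k + 1) start = _
        rw [List.set_cons_succ]
        congr 1
        apply List.ext_getElem
        · simp
        · intro i h1 h2
          simp only [List.getElem_set, List.getElem_map, List.getElem_range]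
          simp only [List.length_set, List.length_map, List.length_range] at h1
          by_cases hik : k = i
          · subst hik; simp [hb]
          · simp only [if_neg hik]
            have : (i < k ∧ v.testBit i) ↔ (i < k + 1 ∧ v.testBit i) := by
              constructor
              · rintro ⟨a, b⟩; exact ⟨by omega, b⟩
              · rintro ⟨a, b⟩; exact ⟨by omega, b⟩
            simp [this]
      · rw [if_neg (by simp only [mask_cond, ne_eq]; simp [hb])]
        congr 1
        apply List.map_congr_left
        intro j hj
        congr 1
        simp only [eq_iff_iff]
        constructor
        · rintro ⟨a, b⟩; exact ⟨by omega, b⟩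
        · rintro ⟨a, b⟩
          refine ⟨?_, b⟩
          rcases Nat.lt_succ_iff_lt_or_eq.mp a with h | h
          · exact h
          · subst h; exact absurd b hb
    rw [hstep]
    have : (k : Int) + 1 = ((k + 1 : Nat) : Int) := by push_cast; ring
    rw [this]
    exact ih (k + 1) (by omega)

lemma solveLine_eq_lineOf (start c0 : Char) (v : Nat) :
    solveLine start c0 (v : Int) = String.mk (lineOf start c0 v) := by
  have h0 : ([start] ++ List.replicate 9 c0)
      = (start :: (List.range 9).map (fun j => if j < 0 ∧ v.testBit j then start else c0)) := by
    simp [List.replicate, List.range_succ]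
  have key : (PySem.List.pyRange 0 9 1).foldl (fun cur i =>
      let mask : Int := 1 <<< i.toNat
      if PySem.Int.band (v : Int) mask ≠ 0 then PySem.List.pySetD cur (i + 1) start else cur)
      ([start] ++ List.replicate 9 c0) = lineOf start c0 v := by
    rw [h0]
    have := foldA_inv start c0 v 9 0 (by omega)
    simp only [Nat.cast_zero] at this
    exact this
  exact congrArg String.mk key

lemma lineOf_eq_rowOfW (start c0 : Char) (v : Nat) :
    lineOf start c0 v = start :: rowOfW start c0 9 v := by
  rw [lineOf, rowOfW_eq_map]

-- ===== VERDICT (by name: the statement is the Claim_ definition above) =====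
theorem solve_spec : Claim_equal_solve := by
  intro n first _ _
  unfold Spec_solve solve solve_alt
  cases h : PySem.Str.pyGet? first 0 with
  | none => rfl
  | some c0 =>
    simp only []
    set start : Char := if c0 = '-' then '.' else '-' with hstart
    have hne : c0 ≠ start := by
      rw [hstart]
      by_cases hc : c0 = '-' <;> simp [hc]
    congr 1
    -- A's fold appends one line per state; rewrite it as a map over the range
    rw [PySem.List.foldl_append_singleton_eq_map, PySem.List.pyRange_one]
    -- B's loop, started at counter value 0
    have hrep : List.replicate 9 c0 = rowOfW start c0 9 0 := by
      rw [rowOfW_eq_map]; simp [List.replicate, List.range_succ]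
    rw [hrep, bLoop_eq start c0 hne ((n - 1).toNat) 0]
    simp only [List.nil_append, Int.sub_zero, zero_add, Nat.zero_add, List.map_map]
    apply List.map_congr_left
    intro k _
    simp only [Function.comp_apply]
    rw [solveLine_eq_lineOf, lineOf_eq_rowOfW]
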